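-- pv_equiv track=rewrite | github.com/YuanchengJin/CP1404practical | practicals/prac_05/wimbledon.py | count_champions
-- ===== SOURCE A (Python) =====
-- def count_champions(data):
--     # Count the number of wins by each champion.
--     champion_counts = {}
--     for row in data[1:]:
--         champion = row[2]
--         if champion in champion_counts:
--             champion_counts[champion] += 1
--         else:
--             champion_counts[champion] = 1
--     return champion_counts
-- ===== SOURCE B (Python) =====
-- def count_champions(data):
--     # Count the number of wins by each champion, by repeated partition:
--     # take the first remaining name, drop every copy of it from the list,
--     # and record how many copies disappeared; repeat until the list is empty.
--     names = [row[2] for row in data[1:]]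
--     counts = {}
--     while names:
--         champ = names[0]
--         rest = [n for n in names if n != champ]
--         counts[champ] = len(names) - len(rest)
--         names = rest
--     return counts
-- ===== Notes on version B (the rewrite author's own statement) =====
-- stated objective: alternative
-- what changed: B replaces A's single-pass membership-test-and-increment dict loop by a partition loop over distinct champions: repeatedly take the first remaining name, filter all its copies out of the list, and record the drop in length as its count.
import Mathlib
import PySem

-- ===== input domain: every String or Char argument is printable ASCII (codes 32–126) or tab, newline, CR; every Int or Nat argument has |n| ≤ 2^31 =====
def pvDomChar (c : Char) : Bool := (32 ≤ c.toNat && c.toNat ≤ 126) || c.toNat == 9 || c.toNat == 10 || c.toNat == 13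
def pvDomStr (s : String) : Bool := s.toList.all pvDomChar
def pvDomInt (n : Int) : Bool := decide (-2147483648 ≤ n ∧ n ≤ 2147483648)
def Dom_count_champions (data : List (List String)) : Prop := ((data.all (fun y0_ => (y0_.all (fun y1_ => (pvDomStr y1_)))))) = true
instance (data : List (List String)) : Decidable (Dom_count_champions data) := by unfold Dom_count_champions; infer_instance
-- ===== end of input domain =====

-- B replaces A's incremental hash-counting loop by repeated partition: split off
-- all copies of the first remaining name and record how many disappeared
-- (objective: alternative; not faster).


-- ===== PORT A =====
def count_champions (data : List (List String)) : List (String × Int) :=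
  (PySem.List.slice data (some 1) none |>.foldl
    (fun champion_counts row =>
      let champion := PySem.List.pyGetD row 2 ""
      if champion_counts.contains champion then
        champion_counts.modify champion 0 (· + 1)
      else
        champion_counts.insert champion 1)
    (PySem.Dict.empty : PySem.Dict String Int)).items

-- ===== PORT B =====
-- the 'while names:' loop of Source B, step for step
def pvTallyLoop (names : List String) (counts : PySem.Dict String Int) :
    PySem.Dict String Int :=
  match names with
  | [] => counts
  | champ :: t =>
    let rest := (champ :: t).filter (fun n => n != champ)
    pvTallyLoop rest
      (counts.insert champ ((((champ :: t).length - rest.length : Nat) : Int)))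
termination_by names.length
decreasing_by
  simp only [List.filter_cons, bne_self_eq_false]
  exact Nat.lt_succ_of_le (List.length_filter_le _ _)

def count_champions_alt (data : List (List String)) : List (String × Int) :=
  let names := (PySem.List.slice data (some 1) none).map
    (fun row => PySem.List.pyGetD row 2 "")
  (pvTallyLoop names (PySem.Dict.empty : PySem.Dict String Int)).items

-- ===== PRECONDITION & SPEC =====
-- Pre_ excludes exactly the inputs where Python A raises IndexError on row[2]:
-- some row after the header has fewer than 3 entries.
def Pre_count_champions (data : List (List String)) : Prop :=
  ∀ row ∈ data.tail, 3 ≤ row.length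
instance (data : List (List String)) : Decidable (Pre_count_champions data) := by
  unfold Pre_count_champions; infer_instance
def pvWitness_count_champions : List (List String) :=
  [["Year", "Country", "Champion"], ["2020", "GBR", "Ann"], ["2021", "GBR", "Ann"]]
def Spec_count_champions (data : List (List String)) (out : List (String × Int)) : Prop := out = count_champions_alt data
instance (data : List (List String)) (out : List (String × Int)) : Decidable (Spec_count_champions data out) := by unfold Spec_count_champions; infer_instance

-- ===== CLAIM (what is proved, stated in full; the proofs are below) =====
def Claim_equal_count_champions : Prop := ∀ (data : List (List String)), Dom_count_champions data → Pre_count_champions data → Spec_count_champions data (count_champions data)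

-- ===== LEMMAS AND PROOFS =====

-- An absent-key insert of 1 is the same dict as a counting modify with default 0.
theorem pv_insert_one_eq_modify (d : PySem.Dict String Int) (c : String)
    (h : d.contains c = false) : d.insert c 1 = d.modify c 0 (· + 1) := by
  have h0 : d.getD c 0 = 0 := PySem.Dict.getD_of_not_contains d 0 h
  simp [PySem.Dict.insert, PySem.Dict.modify, h, h0]

-- A's loop body is exactly the Counter step, so A's dict is counter names.
theorem pv_A_fold_eq_counter (names : List String) :
    (names.foldl
      (fun d c => if d.contains c then d.modify c 0 (· + 1) else d.insert c 1)
      (PySem.Dict.empty : PySem.Dict String Int)) = PySem.Dict.counter names := by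
  rw [PySem.Dict.counter_eq_foldl]
  have hstep : (fun (d : PySem.Dict String Int) (c : String) =>
      if d.contains c then d.modify c 0 (· + 1) else d.insert c 1) =
      fun d c => d.modify c 0 (· + 1) := by
    funext d c
    by_cases h : d.contains c = true
    · simp [h]
    · have h' : d.contains c = false := by simpa using h
      simp [h', pv_insert_one_eq_modify d c h']
  rw [hstep]

-- set() commutes with filtering: dedup of a filtered list = filtered dedup.
theorem pv_ofList_filter (p : String → Bool) (l : List String) :
    PySem.Set.ofList (l.filter p) = (PySem.Set.ofList l).filter p := by
  induction l with
  | nil => rfl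
  | cons x xs ih =>
    by_cases hx : p x = true
    · rw [List.filter_cons_of_pos hx, PySem.Set.ofList_cons, PySem.Set.ofList_cons,
          List.filter_cons_of_pos hx, ih]
      refine congrArg (List.cons x) ?_
      show PySem.Set.discard ((PySem.Set.ofList xs).filter p) x =
        ((PySem.Set.ofList xs).discard x).filter p
      simp only [PySem.Set.discard, List.filter_filter]
      exact congrFun (congrArg _ (by funext y; rw [Bool.and_comm])) _
    · have hx' : p x = false := by simpa using hx
      rw [List.filter_cons_of_neg (by simp [hx']), PySem.Set.ofList_cons,
          List.filter_cons_of_neg (by simp [hx']), ih]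
      show (PySem.Set.ofList xs).filter p =
        ((PySem.Set.ofList xs).discard x).filter p
      simp only [PySem.Set.discard, List.filter_filter]
      refine congrFun (congrArg _ (by funext y; by_cases hy : y = x <;> simp [hy, hx'])) _

-- the partition size is exactly the count of the split-off name
theorem pv_partition_count (c : String) (t : List String) :
    ((c :: t).length - ((c :: t).filter (fun n => n != c)).length : Nat) =
      List.count c (c :: t) := by
  rw [List.filter_cons, List.count_cons_self]
  simp only [bne_self_eq_false, Bool.false_eq_true, ite_false]
  have h1 : (t.filter (fun n => n != c)).length = List.countP (fun n => n != c) t :=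
    (List.countP_eq_length_filter).symm
  have h2 : t.length = List.countP (fun n => n == c) t +
      List.countP (fun a => decide ¬((fun n => n == c) a) = true) t :=
    List.length_eq_countP_add_countP _
  have h3 : List.countP (fun a : String => decide ¬((fun n => n == c) a) = true) t =
      List.countP (fun n => n != c) t := by
    refine List.countP_congr (fun a _ => ?_)
    by_cases ha : a = c <;> simp [ha]
  have h4 : List.count c t = List.countP (fun n => n == c) t := rfl
  simp only [List.length_cons, h1, h4]
  omega

-- characterisation of Source B's while loop: fresh keys get appended with their counts
theorem pv_tally_items (names : List String) (d : PySem.Dict String Int)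
    (hd : ∀ k ∈ names, d.contains k = false) :
    (pvTallyLoop names d).items =
      d.items ++ (PySem.Set.ofList names).map
        (fun k => (k, (List.count k names : Int))) := by
  match names with
  | [] => simp [pvTallyLoop]
  | c :: t =>
    rw [pvTallyLoop]
    have hrest : ((c :: t).filter (fun n => n != c)) = t.filter (fun n => n != c) := by
      simp
    have hlen : (t.filter (fun n => n != c)).length < (c :: t).length :=
      Nat.lt_succ_of_le (List.length_filter_le _ _)
    have hdc : d.contains c = false := hd c (List.mem_cons_self)
    have hd' : ∀ k ∈ t.filter (fun n => n != c),
        (d.insert c (((c :: t).length - (t.filter (fun n => n != c)).length : Nat) : Int)).contains k = false := by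
      intro k hk
      have hkt := List.of_mem_filter hk
      have hkne : k ≠ c := by simpa using hkt
      rw [PySem.Dict.contains_insert]
      simp [hkne, hd k (List.mem_cons_of_mem _ (List.mem_of_mem_filter hk))]
    rw [hrest, pv_tally_items (t.filter (fun n => n != c)) _ hd',
        PySem.Dict.items_insert_of_not_contains _ _ hdc]
    rw [show ((c :: t).length - (t.filter (fun n => n != c)).length : Nat) =
          ((c :: t).length - ((c :: t).filter (fun n => n != c)).length : Nat) by rw [hrest],
        pv_partition_count c t, List.append_assoc]
    congr 1
    rw [PySem.Set.ofList_cons, List.map_cons, List.singleton_append, pv_ofList_filter,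
        show (PySem.Set.ofList t).discard c =
          (PySem.Set.ofList t).filter (fun n => n != c) from rfl]
    refine congrArg (List.cons _) ?_
    refine List.map_congr_left (fun k hk => ?_)
    have hkne : (fun n => n != c) k = true := List.of_mem_filter (p := fun n => n != c) hk
    have hkne' : k ≠ c := by simpa using hkne
    rw [List.count_filter (by simpa using hkne'), List.count_cons_of_ne hkne'.symm]
termination_by names.length
decreasing_by exact Nat.lt_succ_of_le (List.length_filter_le _ _)

-- ===== VERDICT (by name: the statement is the Claim_ definition above) =====
theorem count_champions_spec : Claim_equal_count_champions := by
  intro data _ _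
  unfold Spec_count_champions count_champions count_champions_alt
  rw [← List.foldl_map (f := fun row => PySem.List.pyGetD row 2 "")
        (g := fun (d : PySem.Dict String Int) c =>
          if d.contains c = true then d.modify c 0 (· + 1) else d.insert c 1),
      pv_A_fold_eq_counter, PySem.Dict.items_counter,
      pv_tally_items _ _ (fun k _ => rfl)]
  rfl
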